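-- pv_equiv track=rewrite | github.com/manchesterjm/weather-database-backup | scripts/weather_spaghetti.py | build_precip_spaghetti
-- ===== SOURCE A (Python) =====
-- def build_precip_spaghetti(data):
--     """
--     Build spaghetti chart data for precipitation probability.
--
--     Returns dict: {target_date: {fetch_time: {'max': prob}}}
--     """
--     spaghetti = {}
--
--     for fetch_time, target_date, period_name, precip, is_daytime in data:
--         if precip is None:
--             continue
--
--         if target_date not in spaghetti:
--             spaghetti[target_date] = {}
--
--         fetch_key = fetch_time[:16]
--         if fetch_key not in spaghetti[target_date]:
--             spaghetti[target_date][fetch_key] = {'max': 0}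
--
--         # Track max precip probability for the day
--         spaghetti[target_date][fetch_key]['max'] = max(
--             spaghetti[target_date][fetch_key]['max'],
--             precip
--         )
--
--     return spaghetti
-- ===== SOURCE B (Python) =====
-- def build_precip_spaghetti(data):
--     """Two-pass rewrite: first group precip values per (target_date, fetch_key),
--     then reduce each group with max([0] + values)."""
--     groups = {}
--     for fetch_time, target_date, period_name, precip, is_daytime in data:
--         if precip is None:
--             continue
--         groups.setdefault(target_date, {}).setdefault(fetch_time[:16], []).append(precip)
--
--     result = {}
--     for target_date, by_fetch in groups.items():
--         result[target_date] = {fk: {'max': max([0] + vals)} for fk, vals in by_fetch.items()}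
--     return result
-- ===== Notes on version B (the rewrite author's own statement) =====
-- stated objective: alternative
-- what changed: Replaces the in-place running max per (date, fetch_key) with a two-pass accumulate-then-reduce: first group precip values into lists keyed by date and fetch_time[:16] (insertion order preserved), then build the result by reducing each group with max([0] + values).
import Mathlib
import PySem

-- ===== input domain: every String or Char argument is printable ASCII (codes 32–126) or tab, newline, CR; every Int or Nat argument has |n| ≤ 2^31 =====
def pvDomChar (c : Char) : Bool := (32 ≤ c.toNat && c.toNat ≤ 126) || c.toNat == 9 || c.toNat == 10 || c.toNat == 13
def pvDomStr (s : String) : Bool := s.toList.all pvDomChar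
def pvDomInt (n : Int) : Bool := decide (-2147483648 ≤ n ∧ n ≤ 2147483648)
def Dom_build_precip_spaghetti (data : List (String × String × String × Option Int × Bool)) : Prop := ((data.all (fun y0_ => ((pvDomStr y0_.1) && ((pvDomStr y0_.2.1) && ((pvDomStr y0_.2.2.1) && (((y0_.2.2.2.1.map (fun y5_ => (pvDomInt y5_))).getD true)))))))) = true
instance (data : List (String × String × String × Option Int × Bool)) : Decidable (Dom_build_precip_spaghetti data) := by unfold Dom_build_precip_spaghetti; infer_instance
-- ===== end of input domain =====

-- B replaces A's in-place running max with a two-pass accumulate-then-reduce grouping (same result, alternative decomposition).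

-- ===== PORT A =====
-- loop body of A's for-loop (nested dicts as PySem.Dict; mutation of spaghetti[target_date] in place
-- is modelled by Dict.insert, which overwrites keeping the key's position — exact for Python dicts)
def pvStepA (sp : PySem.Dict String (PySem.Dict String (PySem.Dict String Int)))
    (row : String × String × String × Option Int × Bool) :
    PySem.Dict String (PySem.Dict String (PySem.Dict String Int)) :=
  match row with
  | (fetch_time, target_date, _period_name, precip, _is_daytime) =>
    match precip with
    | none => sp
    | some p =>
      let sp := if sp.contains target_date then sp else sp.insert target_date PySem.Dict.empty
      let fetch_key := PySem.Str.slice fetch_time none (some 16)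
      let sp :=
        if (sp.getD target_date PySem.Dict.empty).contains fetch_key then sp
        else sp.insert target_date
          ((sp.getD target_date PySem.Dict.empty).insert fetch_key (PySem.Dict.ofList [("max", (0 : Int))]))
      let inner := (sp.getD target_date PySem.Dict.empty).getD fetch_key PySem.Dict.empty
      sp.insert target_date
        ((sp.getD target_date PySem.Dict.empty).insert fetch_key
          (inner.insert "max" (max (inner.getD "max" 0) p)))

def build_precip_spaghetti (data : List (String × String × String × Option Int × Bool)) : List (String × List (String × List (String × Int))) :=
  let spaghetti := data.foldl pvStepA PySem.Dict.empty
  -- the returned dict-of-dicts-of-dicts rendered to the association-list convention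
  spaghetti.items.map (fun dm => (dm.1, dm.2.items.map (fun ki => (ki.1, ki.2.items))))

-- ===== PORT B =====
-- loop body of B's first pass: groups.setdefault(td, {}).setdefault(fetch_time[:16], []).append(p)
def pvStepB (g : PySem.Dict String (PySem.Dict String (List Int)))
    (row : String × String × String × Option Int × Bool) :
    PySem.Dict String (PySem.Dict String (List Int)) :=
  match row with
  | (fetch_time, target_date, _period_name, precip, _is_daytime) =>
    match precip with
    | none => g
    | some p =>
      g.modify target_date PySem.Dict.empty
        (fun byf => byf.modify (PySem.Str.slice fetch_time none (some 16)) [] (fun l => l ++ [p]))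

def build_precip_spaghetti_alt (data : List (String × String × String × Option Int × Bool)) : List (String × List (String × List (String × Int))) :=
  let groups := data.foldl pvStepB PySem.Dict.empty
  -- second pass: result[td] = {fk: {'max': max([0] + vals)} for fk, vals in by_fetch.items()}
  -- (the literal one-key dict {'max': v} is rendered directly as [("max", v)])
  let result : PySem.Dict String (List (String × List (String × Int))) :=
    groups.items.foldl (fun r tb =>
      r.insert tb.1
        ((PySem.Dict.ofList (tb.2.items.map (fun fv =>
          (fv.1, [("max", (PySem.List.max? ((0 : Int) :: fv.2) (fun x => x)).getD 0)])))).items))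
      PySem.Dict.empty
  result.items

-- ===== PRECONDITION & SPEC =====
def Spec_build_precip_spaghetti (data : List (String × String × String × Option Int × Bool)) (out : List (String × List (String × List (String × Int)))) : Prop := out = build_precip_spaghetti_alt data
instance (data : List (String × String × String × Option Int × Bool)) (out : List (String × List (String × List (String × Int)))) : Decidable (Spec_build_precip_spaghetti data out) := by unfold Spec_build_precip_spaghetti; infer_instance

-- ===== CLAIM (what is proved, stated in full; the proofs are below) =====
def Claim_equal_build_precip_spaghetti : Prop := ∀ (data : List (String × String × String × Option Int × Bool)), Dom_build_precip_spaghetti data → Spec_build_precip_spaghetti data (build_precip_spaghetti data)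

-- ===== LEMMAS AND PROOFS =====

-- map over a dict's VALUES (key positions unchanged); the bridge between A's state and B's state
def pvMapVals {nu nu' : Type} (f : nu → nu') (d : PySem.Dict String nu) : PySem.Dict String nu' :=
  PySem.Dict.mk (d.items.map (fun p => (p.1, f p.2)))

theorem pvMapVals_contains {nu nu' : Type} (f : nu → nu') (d : PySem.Dict String nu) (k : String) :
    (pvMapVals f d).contains k = d.contains k := by
  simp only [pvMapVals, PySem.Dict.contains]
  induction d.items with
  | nil => rfl
  | cons a l ih => simp [ih]

theorem pvMapVals_get? {nu nu' : Type} (f : nu → nu') (d : PySem.Dict String nu) (k : String) :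
    (pvMapVals f d).get? k = (d.get? k).map f := by
  simp only [pvMapVals, PySem.Dict.get?]
  induction d.items with
  | nil => rfl
  | cons a l ih =>
    by_cases h : a.1 == k
    · simp [List.find?, h]
    · simpa [List.find?, h] using ih

theorem pvMapVals_getD {nu nu' : Type} (f : nu → nu') (d : PySem.Dict String nu) (k : String) (d0 : nu) :
    (pvMapVals f d).getD k (f d0) = f (d.getD k d0) := by
  simp only [PySem.Dict.getD, pvMapVals_get?]
  cases d.get? k <;> rfl

theorem pvMapVals_insert {nu nu' : Type} (f : nu → nu') (d : PySem.Dict String nu) (k : String) (v : nu) :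
    (pvMapVals f d).insert k (f v) = pvMapVals f (d.insert k v) := by
  simp only [PySem.Dict.insert, pvMapVals_contains]
  by_cases h : d.contains k
  · simp only [h, if_true, pvMapVals, List.map_map]
    congr 1
    apply List.map_congr_left
    intro p _
    by_cases hp : p.1 == k <;> simp [hp, Function.comp]
  · simp [h, pvMapVals]

theorem pvGetD_of_not_contains {kk nu : Type} [BEq kk] (d : PySem.Dict kk nu) (k : kk) (d0 : nu)
    (h : d.contains k = false) : d.getD k d0 = d0 := by
  simp only [PySem.Dict.getD, PySem.Dict.get?]
  have : d.items.find? (fun p => p.1 == k) = none := by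
    rw [List.find?_eq_none]
    intro p hp
    have := List.any_eq_false.mp h p hp
    simpa using this
  simp [this]

theorem pvGetD_of_contains {kk nu : Type} [BEq kk] (d : PySem.Dict kk nu) (k : kk) (a b : nu)
    (h : d.contains k = true) : d.getD k a = d.getD k b := by
  simp only [PySem.Dict.getD, PySem.Dict.get?]
  cases hf : d.items.find? (fun p => p.1 == k) with
  | none =>
    obtain ⟨p, hp, hpk⟩ := List.any_eq_true.mp h
    exact absurd hpk (List.find?_eq_none.mp hf p hp)
  | some q => rfl

theorem pvInsert_insert {kk nu : Type} [BEq kk] [LawfulBEq kk] (d : PySem.Dict kk nu) (k : kk) (v w : nu) :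
    (d.insert k v).insert k w = d.insert k w := by
  simp only [PySem.Dict.insert, PySem.Dict.contains]
  split_ifs with h1 h2 h2
  · simp only [List.map_map]
    congr 1
    apply List.map_congr_left
    intro q _
    by_cases hq : (q.1 == k) = true <;> simp [hq, Function.comp]
  · exfalso
    obtain ⟨p, hp, hpk⟩ := List.any_eq_true.mp h1
    apply h2
    show ((d.items.map fun q => if (q.1 == k) = true then (k, v) else q).any fun q => q.1 == k) = true
    rw [List.any_map]
    exact List.any_eq_true.mpr ⟨p, hp, by simp [Function.comp, hpk]⟩
  · simp only [Bool.not_eq_true] at h1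
    have hall := List.any_eq_false.mp h1
    show PySem.Dict.mk ((d.items ++ [(k, v)]).map fun p => if (p.1 == k) = true then (k, w) else p)
      = PySem.Dict.mk (d.items ++ [(k, w)])
    rw [List.map_append]
    have e1 : (d.items.map fun p => if (p.1 == k) = true then (k, w) else p) = d.items := by
      rw [show (d.items.map fun p => if (p.1 == k) = true then (k, w) else p) = d.items.map id from
        List.map_congr_left (fun p hp => by
          have hpp := hall p hp
          simp only [Bool.not_eq_true] at hpp
          simp [hpp]), List.map_id]
    rw [e1]
    simp
  · exfalso
    apply h2
    show ((d.items ++ [(k, v)]).any fun p => p.1 == k) = true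
    simp

-- the reduce of B's second pass, as a dict: {'max': max-over-the-group with a 0 floor}
def pvRInner (vals : List Int) : PySem.Dict String Int :=
  PySem.Dict.mk [("max", vals.foldl max 0)]

def pvRMid (m : PySem.Dict String (List Int)) : PySem.Dict String (PySem.Dict String Int) :=
  pvMapVals pvRInner m

def pvRTop (g : PySem.Dict String (PySem.Dict String (List Int))) :
    PySem.Dict String (PySem.Dict String (PySem.Dict String Int)) :=
  pvMapVals pvRMid g

theorem pvRMid_empty : pvRMid PySem.Dict.empty = PySem.Dict.empty := rfl

theorem pvRMid_contains (m : PySem.Dict String (List Int)) (k : String) :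
    (pvRMid m).contains k = m.contains k := pvMapVals_contains pvRInner m k

theorem pvRTop_contains (g : PySem.Dict String (PySem.Dict String (List Int))) (k : String) :
    (pvRTop g).contains k = g.contains k := pvMapVals_contains pvRMid g k

theorem pvRMid_insert (m : PySem.Dict String (List Int)) (k : String) (v : List Int) :
    (pvRMid m).insert k (pvRInner v) = pvRMid (m.insert k v) := pvMapVals_insert pvRInner m k v

theorem pvRTop_insert (g : PySem.Dict String (PySem.Dict String (List Int))) (k : String)
    (v : PySem.Dict String (List Int)) :
    (pvRTop g).insert k (pvRMid v) = pvRTop (g.insert k v) := pvMapVals_insert pvRMid g k v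

theorem pvRTop_getD (g : PySem.Dict String (PySem.Dict String (List Int))) (k : String) :
    (pvRTop g).getD k PySem.Dict.empty = pvRMid (g.getD k PySem.Dict.empty) := by
  conv_lhs => rw [← pvRMid_empty]
  exact pvMapVals_getD pvRMid g k PySem.Dict.empty

theorem pvRMid_getD (m : PySem.Dict String (List Int)) (k : String) (h : m.contains k = true) :
    (pvRMid m).getD k PySem.Dict.empty = pvRInner (m.getD k []) := by
  rw [pvGetD_of_contains _ k _ (pvRInner []) (by rw [pvRMid_contains]; exact h)]
  exact pvMapVals_getD pvRInner m k []

theorem pvRInner_getD (vals : List Int) : (pvRInner vals).getD "max" 0 = vals.foldl max 0 := by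
  simp [pvRInner, PySem.Dict.getD, PySem.Dict.get?]

theorem pvRInner_insert (vals : List Int) (x : Int) :
    (pvRInner vals).insert "max" x = PySem.Dict.mk [("max", x)] := by
  simp [pvRInner, PySem.Dict.insert, PySem.Dict.contains]

theorem pvRInner_snoc (vals : List Int) (p : Int) :
    pvRInner (vals ++ [p]) = PySem.Dict.mk [("max", max (vals.foldl max 0) p)] := by
  simp [pvRInner, List.foldl_append]

theorem pvOfList_max0 : PySem.Dict.ofList [("max", (0 : Int))] = pvRInner [] := rfl

theorem pvRTop_insert_empty (g : PySem.Dict String (PySem.Dict String (List Int))) (k : String) :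
    (pvRTop g).insert k PySem.Dict.empty = pvRTop (g.insert k PySem.Dict.empty) := by
  conv_lhs => rw [← pvRMid_empty]
  exact pvRTop_insert g k PySem.Dict.empty

-- A's loop body applied to the rendering of B's state is the rendering of B's loop body
theorem pvStep_comm (G : PySem.Dict String (PySem.Dict String (List Int)))
    (row : String × String × String × Option Int × Bool) :
    pvStepA (pvRTop G) row = pvRTop (pvStepB G row) := by
  obtain ⟨ft, td, pn, precip, b⟩ := row
  cases precip with
  | none => rfl
  | some p =>
    simp only [pvStepA, pvStepB, PySem.Dict.modify]
    set key := PySem.Str.slice ft none (some 16) with hkey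
    by_cases hc : G.contains td = true
    · rw [pvRTop_contains, hc, if_pos rfl, pvRTop_getD]
      set m0 := G.getD td PySem.Dict.empty with hm0
      by_cases hk : m0.contains key = true
      · rw [pvRMid_contains, hk, if_pos rfl, pvRTop_getD, ← hm0, pvRMid_getD m0 key hk,
          pvRInner_getD, pvRInner_insert, ← pvRInner_snoc, pvRMid_insert, pvRTop_insert]
      · have hk' : m0.contains key = false := by simpa using hk
        rw [pvRMid_contains, hk', if_neg (by simp), pvOfList_max0, pvRMid_insert, pvRTop_insert]
        rw [pvRTop_getD, PySem.Dict.getD_insert_self,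
          pvRMid_getD _ key (PySem.Dict.contains_insert_self m0 key []),
          PySem.Dict.getD_insert_self, pvRInner_getD, pvRInner_insert]
        rw [show PySem.Dict.mk [("max", max (List.foldl max 0 []) p)] = pvRInner ([] ++ [p]) from
          (pvRInner_snoc [] p).symm]
        rw [pvRMid_insert, pvRTop_insert, pvInsert_insert, pvInsert_insert]
        rw [pvGetD_of_not_contains m0 key [] hk']
    · rw [pvRTop_contains, if_neg hc]
      have hc' : G.contains td = false := by simpa using hc
      rw [pvRTop_insert_empty, pvRTop_getD, PySem.Dict.getD_insert_self, pvRMid_contains,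
        PySem.Dict.contains_empty, if_neg (by simp)]
      rw [pvOfList_max0, pvRMid_insert, pvRTop_insert, pvInsert_insert]
      rw [pvRTop_getD, PySem.Dict.getD_insert_self,
        pvRMid_getD _ key (PySem.Dict.contains_insert_self PySem.Dict.empty key []),
        PySem.Dict.getD_insert_self, pvRInner_getD, pvRInner_insert]
      rw [show PySem.Dict.mk [("max", max (List.foldl max 0 []) p)] = pvRInner ([] ++ [p]) from
        (pvRInner_snoc [] p).symm]
      rw [pvRMid_insert, pvRTop_insert, pvInsert_insert]
      rw [pvGetD_of_not_contains G td PySem.Dict.empty hc',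
        pvGetD_of_not_contains PySem.Dict.empty key [] (PySem.Dict.contains_empty key), pvInsert_insert]

theorem pvFold_comm (data : List (String × String × String × Option Int × Bool))
    (G : PySem.Dict String (PySem.Dict String (List Int))) :
    data.foldl pvStepA (pvRTop G) = pvRTop (data.foldl pvStepB G) := by
  induction data generalizing G with
  | nil => rfl
  | cons r l ih => simp only [List.foldl_cons, pvStep_comm, ih]

-- items of inserts / membership facts used for the nodup-keys invariant of B's grouping table
theorem pvMem_insert {kk nu : Type} [BEq kk] {d : PySem.Dict kk nu} {k : kk} {v : nu} {p : kk × nu}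
    (h : p ∈ (d.insert k v).items) : p = (k, v) ∨ p ∈ d.items := by
  simp only [PySem.Dict.insert] at h
  split_ifs at h with hc
  · rcases List.mem_map.mp h with ⟨q, hq, he⟩
    by_cases hqk : (q.1 == k) = true
    · left; rw [← he]; simp [hqk]
    · right; rw [← he]; simp only [hqk]; exact hq
  · rcases List.mem_append.mp h with h1 | h1
    · right; exact h1
    · left; simpa using h1

theorem pvInsert_items_of_not_contains {kk nu : Type} [BEq kk] (d : PySem.Dict kk nu) (k : kk)
    (v : nu) (h : d.contains k = false) : (d.insert k v).items = d.items ++ [(k, v)] := by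
  simp only [PySem.Dict.insert]
  rw [if_neg (by simp [h])]

theorem pvGetD_keys_nodup {nu : Type} (g : PySem.Dict String (PySem.Dict String nu))
    (hg : ∀ p ∈ g.items, p.2.keys.Nodup) (k : String) :
    (g.getD k PySem.Dict.empty).keys.Nodup := by
  simp only [PySem.Dict.getD, PySem.Dict.get?]
  cases hf : g.items.find? (fun p => p.1 == k) with
  | none => simp [PySem.Dict.keys, PySem.Dict.empty]
  | some q => simpa using hg q (List.mem_of_find?_eq_some hf)

-- invariant of B's grouping table: outer keys and every inner dict's keys stay duplicate-free
def pvInv (g : PySem.Dict String (PySem.Dict String (List Int))) : Prop :=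
  g.keys.Nodup ∧ ∀ p ∈ g.items, p.2.keys.Nodup

theorem pvInv_step (g : PySem.Dict String (PySem.Dict String (List Int)))
    (row : String × String × String × Option Int × Bool) (h : pvInv g) : pvInv (pvStepB g row) := by
  obtain ⟨ft, td, pn, precip, b⟩ := row
  cases precip with
  | none => exact h
  | some p =>
    simp only [pvStepB, PySem.Dict.modify]
    constructor
    · exact PySem.Dict.nodup_keys_insert _ _ _ h.1
    · intro q hq
      rcases pvMem_insert hq with he | hm
      · rw [he]
        exact PySem.Dict.nodup_keys_insert _ _ _ (pvGetD_keys_nodup g h.2 td)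
      · exact h.2 q hm

theorem pvInv_fold (data : List (String × String × String × Option Int × Bool))
    (g : PySem.Dict String (PySem.Dict String (List Int))) (h : pvInv g) :
    pvInv (data.foldl pvStepB g) := by
  induction data generalizing g with
  | nil => exact h
  | cons r l ih => exact ih _ (pvInv_step g r h)

-- folding insert over a list with fresh, duplicate-free keys just appends its pairs
theorem pvFoldInsert_items {nu : Type} (l : List (String × nu)) (d : PySem.Dict String nu)
    (hnd : (l.map Prod.fst).Nodup)
    (hdis : ∀ k ∈ l.map Prod.fst, d.contains k = false) :
    (l.foldl (fun r p => r.insert p.1 p.2) d).items = d.items ++ l := by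
  induction l generalizing d with
  | nil => simp
  | cons a l ih =>
    simp only [List.map_cons, List.nodup_cons] at hnd
    have hca : d.contains a.1 = false := hdis a.1 (by simp)
    have hdis' : ∀ k ∈ l.map Prod.fst, (d.insert a.1 a.2).contains k = false := by
      intro k hk
      rw [PySem.Dict.contains_insert]
      have hne : k ≠ a.1 := fun he => hnd.1 (he ▸ hk)
      simp [hne, hdis k (by simp [hk])]
    rw [List.foldl_cons, ih (d.insert a.1 a.2) hnd.2 hdis',
      pvInsert_items_of_not_contains d a.1 a.2 hca]
    simp

-- Python's max([0] + vals) is the left fold of max seeded with 0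
theorem pvMaxD (vals : List Int) :
    (PySem.List.max? ((0 : Int) :: vals) (fun x => x)).getD 0 = vals.foldl max 0 := by
  rw [PySem.List.max?_id_cons]
  rfl

theorem pvRTop_items (g : PySem.Dict String (PySem.Dict String (List Int))) :
    (pvRTop g).items = g.items.map (fun p => (p.1, pvRMid p.2)) := rfl

theorem pvRMid_items (m : PySem.Dict String (List Int)) :
    (pvRMid m).items = m.items.map (fun q => (q.1, pvRInner q.2)) := rfl

theorem pvSecondPass {nu' : Type} (g : PySem.Dict String (PySem.Dict String (List Int)))
    (F : PySem.Dict String (List Int) → nu') (hg : g.keys.Nodup) :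
    (g.items.foldl (fun r tb => r.insert tb.1 (F tb.2)) PySem.Dict.empty).items
      = g.items.map (fun tb => (tb.1, F tb.2)) := by
  rw [show g.items.foldl (fun r tb => r.insert tb.1 (F tb.2)) PySem.Dict.empty
      = (g.items.map (fun tb => (tb.1, F tb.2))).foldl (fun r p => r.insert p.1 p.2)
          PySem.Dict.empty
    from (List.foldl_map
      (f := fun tb : String × PySem.Dict String (List Int) => (tb.1, F tb.2))
      (g := fun (r : PySem.Dict String nu') (p : String × nu') => r.insert p.1 p.2)).symm]
  rw [pvFoldInsert_items _ _ (by simpa [List.map_map] using hg)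
    (fun k _ => PySem.Dict.contains_empty k)]
  rfl

theorem pvOfList_items {nu : Type} (l : List (String × nu)) (h : (l.map Prod.fst).Nodup) :
    (PySem.Dict.ofList l).items = l := by
  show (l.foldl (fun r p => r.insert p.1 p.2) PySem.Dict.empty).items = l
  rw [pvFoldInsert_items l PySem.Dict.empty h (fun k _ => PySem.Dict.contains_empty k)]
  rfl

theorem build_precip_spaghetti_spec : Claim_equal_build_precip_spaghetti := by
  unfold Claim_equal_build_precip_spaghetti
  intro data _
  unfold Spec_build_precip_spaghetti build_precip_spaghetti build_precip_spaghetti_alt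
  dsimp only
  have hfold : data.foldl pvStepA PySem.Dict.empty
      = pvRTop (data.foldl pvStepB PySem.Dict.empty) := pvFold_comm data PySem.Dict.empty
  rw [hfold]
  set Gf := data.foldl pvStepB PySem.Dict.empty with hGf
  have hinv : pvInv Gf := pvInv_fold data PySem.Dict.empty
    ⟨by simp [PySem.Dict.keys, PySem.Dict.empty], by simp [PySem.Dict.empty]⟩
  -- B's second pass: Gf's outer keys are duplicate-free, so folding insert just appends
  have houter := pvSecondPass Gf (fun byf =>
    ((PySem.Dict.ofList (byf.items.map (fun fv =>
      (fv.1, [("max", (PySem.List.max? ((0 : Int) :: fv.2) (fun x => x)).getD 0)])))).items))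
    hinv.1
  beta_reduce at houter
  rw [houter, pvRTop_items, List.map_map]
  apply List.map_congr_left
  intro tb htb
  -- per group: the inner keys are duplicate-free, so the comprehension's items are the mapped list
  have hofl := pvOfList_items (tb.2.items.map (fun fv =>
      (fv.1, [("max", (PySem.List.max? ((0 : Int) :: fv.2) (fun x => x)).getD 0)])))
    (by simpa [List.map_map] using hinv.2 tb htb)
  rw [hofl]
  simp only [Function.comp, pvRMid_items, List.map_map]
  apply congrArg
  apply List.map_congr_left
  intro q _
  simp [pvRInner, pvMaxD]
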